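-- pv_equiv track=rewrite | github.com/Andy-zd/Rtplan_gen | generate_qas.py | find_all_indices_for_duplicates
-- ===== SOURCE A (Python) =====
-- def find_all_indices_for_duplicates(object_list):
--     # Create a dictionary to record the number of occurrences of each object
--     counts = {}
--     # Create a dictionary to record the first index where each object appears
--     first_indices = {}
--     # Create a list to collect all indices of duplicate objects
--     duplicate_indices = []
--
--     for idx, obj in enumerate(object_list):
--         if obj in counts:
--             # Increase the occurrence count for the object
--             counts[obj] += 1
--             # When the object appears for the 2nd time, add its first occurrence index to the list
--             if counts[obj] == 2:
--                 duplicate_indices.append(first_indices[obj])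
--             # Add the current index to the list
--             duplicate_indices.append(idx)
--         else:
--             # Initialize the occurrence count and the first index of the object
--             counts[obj] = 1
--             first_indices[obj] = idx
--
--     return duplicate_indices
-- ===== SOURCE B (Python) =====
-- def find_all_indices_for_duplicates(object_list):
--     # One pass builds obj -> list of all its positions; a second stateless pass
--     # emits, at each position, what A would emit there (first index + current
--     # index at the second occurrence, current index alone at later ones).
--     positions = {}
--     for idx, obj in enumerate(object_list):
--         positions.setdefault(obj, []).append(idx)
--     result = []
--     for idx, obj in enumerate(object_list):
--         p = positions[obj]
--         if len(p) > 1 and idx != p[0]: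
--             if idx == p[1]:
--                 result.append(p[0])
--             result.append(idx)
--     return result
-- ===== Notes on version B (the rewrite author's own statement) =====
-- stated objective: alternative
-- what changed: Replaces A's stateful count/first-index bookkeeping with a precomputed index map (obj -> all positions) followed by a stateless second pass that decides each emission by comparing the current index with the map's first two entries.
import Mathlib
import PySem

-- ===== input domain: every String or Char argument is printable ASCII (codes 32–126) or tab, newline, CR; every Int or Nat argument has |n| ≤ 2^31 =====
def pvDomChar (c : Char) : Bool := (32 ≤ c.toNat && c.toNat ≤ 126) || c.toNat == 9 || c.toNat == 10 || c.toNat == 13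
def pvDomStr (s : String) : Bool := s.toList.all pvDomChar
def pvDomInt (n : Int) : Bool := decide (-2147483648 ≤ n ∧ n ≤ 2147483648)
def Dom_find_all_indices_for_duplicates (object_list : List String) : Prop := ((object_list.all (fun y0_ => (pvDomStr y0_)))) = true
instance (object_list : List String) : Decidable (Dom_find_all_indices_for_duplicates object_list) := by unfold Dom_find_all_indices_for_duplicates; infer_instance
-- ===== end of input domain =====

-- B replaces A's stateful count/first-index dictionaries by a precomputed index
-- map (obj -> all its positions) plus a stateless second pass (alternative decomposition, same cost).

-- ===== PORT A =====
def find_all_indices_for_duplicates (object_list : List String) : List Int :=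
  ((PySem.List.enumerate object_list 0).foldl
    (fun (st : PySem.Dict String Int × PySem.Dict String Int × List Int) (p : Int × String) =>
      let counts := st.1
      let firsts := st.2.1
      let dup := st.2.2
      if counts.contains p.2 then
        let counts' := counts.modify p.2 0 (· + 1)
        let dup' := if counts'.getD p.2 0 == 2 then dup ++ [firsts.getD p.2 0] else dup
        (counts', firsts, dup' ++ [p.1])
      else
        (counts.insert p.2 1, firsts.insert p.2 p.1, dup))
    (PySem.Dict.empty, PySem.Dict.empty, [])).2.2

-- ===== PORT B =====
-- first pass: positions.setdefault(obj, []).append(idx)  ==  d[obj] = d.get(obj, []) + [idx]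
def pvPositions (object_list : List String) : PySem.Dict String (List Int) :=
  (PySem.List.enumerate object_list 0).foldl
    (fun d p => d.modify p.2 [] (· ++ [p.1])) PySem.Dict.empty

def find_all_indices_for_duplicates_alt (object_list : List String) : List Int :=
  let positions := pvPositions object_list
  (PySem.List.enumerate object_list 0).foldl
    (fun acc q =>
      let p := positions.getD q.2 []
      if 1 < p.length ∧ q.1 ≠ PySem.List.pyGetD p 0 0 then
        (if q.1 = PySem.List.pyGetD p 1 0 then acc ++ [PySem.List.pyGetD p 0 0] else acc) ++ [q.1]
      else acc)
    []

-- ===== PRECONDITION & SPEC =====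
def Spec_find_all_indices_for_duplicates (object_list : List String) (out : List Int) : Prop := out = find_all_indices_for_duplicates_alt object_list
instance (object_list : List String) (out : List Int) : Decidable (Spec_find_all_indices_for_duplicates object_list out) := by unfold Spec_find_all_indices_for_duplicates; infer_instance

-- ===== CLAIM (what is proved, stated in full; the proofs are below) =====
def Claim_equal_find_all_indices_for_duplicates : Prop := ∀ (object_list : List String), Dom_find_all_indices_for_duplicates object_list → Spec_find_all_indices_for_duplicates object_list (find_all_indices_for_duplicates object_list)

-- ===== LEMMAS AND PROOFS =====

-- the ascending list of positions of c in xs, counting from s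
def myE (s : Int) (xs : List String) (c : String) : List Int :=
  ((PySem.List.enumerate xs s).filter (fun q => q.2 == c)).map (·.1)

theorem myE_nil (s : Int) (c : String) : myE s [] c = [] := rfl

theorem myE_cons (s : Int) (x : String) (xs : List String) (c : String) :
    myE s (x :: xs) c = (if x = c then [s] else []) ++ myE (s + 1) xs c := by
  simp only [myE, PySem.List.enumerate_cons, List.filter_cons]
  by_cases h : x = c <;> simp [h]

theorem myE_append (s : Int) (xs ys : List String) (c : String) :
    myE s (xs ++ ys) c = myE s xs c ++ myE (s + xs.length) ys c := by
  simp [myE, PySem.List.enumerate_append, List.filter_append]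

theorem length_myE (s : Int) (xs : List String) (c : String) :
    (myE s xs c).length = xs.count c := by
  induction xs generalizing s with
  | nil => rfl
  | cons x xs ih =>
    rw [myE_cons]
    by_cases h : x = c <;> simp [h, ih]

theorem mem_myE_bounds (s : Int) (xs : List String) (c : String) :
    ∀ x ∈ myE s xs c, s ≤ x ∧ x < s + xs.length := by
  induction xs generalizing s with
  | nil => simp [myE_nil]
  | cons y ys ih =>
    intro x hx
    rw [myE_cons] at hx
    rcases List.mem_append.1 hx with h | h
    · have hxs : x = s := by by_cases hy : y = c <;> simp [hy] at h; exact h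
      subst hxs
      simp only [List.length_cons]
      push_cast
      omega
    · have := ih (s + 1) x h
      simp only [List.length_cons]
      push_cast at this ⊢
      omega

theorem pvPositions_getD (object_list : List String) (c : String) :
    (pvPositions object_list).getD c [] = myE 0 object_list c := by
  unfold pvPositions myE
  rw [show (List.foldl (fun (d : PySem.Dict String (List Int)) (p : Int × String) => d.modify p.2 [] (· ++ [p.1]))
        PySem.Dict.empty (PySem.List.enumerate object_list 0))
      = (List.foldl (fun (d : PySem.Dict String (List Int)) (q : String × Int) => d.modify q.1 [] (· ++ [q.2]))
        PySem.Dict.empty ((PySem.List.enumerate object_list 0).map Prod.swap)) by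
    rw [List.foldl_map]; rfl]
  rw [PySem.Dict.getD_foldl_modify_append]
  simp [List.filter_map, Function.comp_def]


-- the single induction relating A's stateful fold to B's stateless pass
theorem main_lemma (l : List String) :
    ∀ (rest pre : List String) (counts firsts : PySem.Dict String Int) (acc : List Int),
      l = pre ++ rest →
      (∀ o, counts.contains o = decide (pre.count o ≠ 0)) →
      (∀ o, counts.getD o 0 = (pre.count o : Int)) →
      (∀ o, pre.count o ≠ 0 → firsts.getD o 0 = (myE 0 pre o).headD 0) →
      ((PySem.List.enumerate rest (pre.length : Int)).foldl
        (fun (st : PySem.Dict String Int × PySem.Dict String Int × List Int) (p : Int × String) =>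
          let counts := st.1
          let firsts := st.2.1
          let dup := st.2.2
          if counts.contains p.2 then
            let counts' := counts.modify p.2 0 (· + 1)
            let dup' := if counts'.getD p.2 0 == 2 then dup ++ [firsts.getD p.2 0] else dup
            (counts', firsts, dup' ++ [p.1])
          else
            (counts.insert p.2 1, firsts.insert p.2 p.1, dup))
        (counts, firsts, acc)).2.2
      = (PySem.List.enumerate rest (pre.length : Int)).foldl
        (fun acc q =>
          let p := myE 0 l q.2
          if 1 < p.length ∧ q.1 ≠ PySem.List.pyGetD p 0 0 then
            (if q.1 = PySem.List.pyGetD p 1 0 then acc ++ [PySem.List.pyGetD p 0 0] else acc) ++ [q.1]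
          else acc)
        acc := by
  intro rest
  induction rest with
  | nil => intro pre counts firsts acc _ _ _ _; rfl
  | cons x rest' ih =>
    intro pre counts firsts acc hl h1 h2 h3
    rw [PySem.List.enumerate_cons, List.foldl_cons, List.foldl_cons]
    have hlen1 : ((pre ++ [x]).length : Int) = (pre.length : Int) + 1 := by simp
    have hlx : myE 0 l x = myE 0 pre x ++ (pre.length : Int) :: myE ((pre.length : Int) + 1) rest' x := by
      rw [hl, myE_append, myE_cons]
      simp
    by_cases hk : pre.count x = 0
    · -- first occurrence of x
      have hpre0 : myE 0 pre x = [] := List.eq_nil_of_length_eq_zero (by rw [length_myE, hk])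
      have hcont : counts.contains x = false := by rw [h1 x]; simp [hk]
      have hguard : ¬ (1 < (myE 0 l x).length ∧ ((pre.length : Int)) ≠ PySem.List.pyGetD (myE 0 l x) 0 0) := by
        rw [hlx, hpre0]
        simp [PySem.List.pyGetD]
      simp only [hcont, Bool.false_eq_true, if_false, if_neg hguard]
      have hih := ih (pre ++ [x]) (counts.insert x 1) (firsts.insert x (pre.length : Int)) acc
        (by rw [hl]; simp)
        (by
          intro o
          by_cases ho : o = x
          · simp [ho, PySem.Dict.contains_insert_self, List.count_append]
          · simp [PySem.Dict.contains_insert, ho, h1 o, List.count_append,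
              Ne.symm ho])
        (by
          intro o
          rw [PySem.Dict.getD_insert]
          by_cases ho : o = x
          · simp [ho, List.count_append, hk]
          · simp [ho, h2 o, List.count_append, Ne.symm ho])
        (by
          intro o hco
          by_cases ho : o = x
          · rw [ho, PySem.Dict.getD_insert_self, myE_append, hpre0, myE_cons]
            simp
          · have hco' : pre.count o ≠ 0 := by
              simp [List.count_append, Ne.symm ho] at hco
              exact hco
            rw [PySem.Dict.getD_insert_of_ne firsts _ _ ho, h3 o hco', myE_append, myE_cons]
            simp [Ne.symm ho, myE_nil])
      rw [hlen1] at hih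
      exact hih
    · -- repeated occurrence of x
      have hcont : counts.contains x = true := by rw [h1 x]; simp [hk]
      have hlenpre : (myE 0 pre x).length = pre.count x := length_myE _ _ _
      obtain ⟨a, t, ha⟩ : ∃ a t, myE 0 pre x = a :: t := by
        cases hE : myE 0 pre x with
        | nil => exact absurd (by rw [hE] at hlenpre; exact hlenpre.symm) (by simpa using hk)
        | cons a t => exact ⟨a, t, rfl⟩
      have hp : myE 0 l x = a :: (t ++ (pre.length : Int) :: myE ((pre.length : Int) + 1) rest' x) := by
        rw [hlx, ha]; simp
      have hget0 : PySem.List.pyGetD (myE 0 l x) 0 0 = a := by rw [hp, PySem.List.pyGetD_ofNat']; rfl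
      have halt : a < (pre.length : Int) := by
        have := mem_myE_bounds 0 pre x a (ha ▸ List.mem_cons_self)
        omega
      have hguard : (1 < (myE 0 l x).length ∧ ((pre.length : Int)) ≠ a) :=
        ⟨by rw [hp]; simp, by omega⟩
      have hc2 : (counts.modify x 0 (· + 1)).getD x 0 = (pre.count x : Int) + 1 := by
        rw [PySem.Dict.getD_modify_self, h2 x]
      have hih := ih (pre ++ [x]) (counts.modify x 0 (· + 1)) firsts
        ((if (pre.count x : Int) + 1 == 2 then acc ++ [firsts.getD x 0] else acc) ++ [(pre.length : Int)])
        (by rw [hl]; simp)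
        (by
          intro o
          by_cases ho : o = x
          · simp [ho, PySem.Dict.contains_modify, List.count_append]
          · simp [PySem.Dict.contains_modify, ho, h1 o, List.count_append,
              Ne.symm ho])
        (by
          intro o
          rw [PySem.Dict.getD_modify]
          by_cases ho : o = x
          · simp [ho, List.count_append, h2 x]
          · simp [ho, h2 o, List.count_append, Ne.symm ho])
        (by
          intro o hco
          by_cases ho : o = x
          · rw [ho, h3 x hk, myE_append, myE_cons, ha]
            simp
          · have hco' : pre.count o ≠ 0 := by
              simp [List.count_append, Ne.symm ho] at hco
              exact hco
            rw [h3 o hco', myE_append, myE_cons]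
            simp [Ne.symm ho, myE_nil])
      rw [hlen1] at hih
      have hacc : ((if (pre.length : Int) = PySem.List.pyGetD (myE 0 l x) 1 0 then acc ++ [a] else acc) : List Int)
          = (if (((pre.count x : Int) + 1 == 2) = true) then acc ++ [firsts.getD x 0] else acc) := by
        by_cases hk1 : pre.count x = 1
        · -- second occurrence: t = []
          have ht : t = [] := by
            rw [ha, hk1] at hlenpre
            simpa using hlenpre
          have hget1 : PySem.List.pyGetD (myE 0 l x) 1 0 = (pre.length : Int) := by
            rw [hp, ht, PySem.List.pyGetD_ofNat']; rfl
          have hfx : firsts.getD x 0 = a := by rw [h3 x hk, ha]; rfl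
          rw [hget1, hfx]
          simp [hk1]
        · -- third or later occurrence: t = b :: t'
          obtain ⟨b, t', hb⟩ : ∃ b t', t = b :: t' := by
            cases hT : t with
            | nil => exact absurd (by rw [ha, hT] at hlenpre; simpa using hlenpre.symm) hk1
            | cons b t' => exact ⟨b, t', rfl⟩
          have hget1 : PySem.List.pyGetD (myE 0 l x) 1 0 = b := by
            rw [hp, hb, PySem.List.pyGetD_ofNat']; rfl
          have hblt : b < (pre.length : Int) := by
            have := mem_myE_bounds 0 pre x b (by rw [ha, hb]; simp)
            omega
          rw [hget1, if_neg (by omega : ¬ (pre.length : Int) = b),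
            if_neg (by simp; omega : ¬ (((pre.count x : Int) + 1 == 2) = true))]
      simp only [hcont, if_true, hc2, hget0]
      rw [if_pos hguard, hacc]
      exact hih

-- ===== VERDICT (by name: the statement is the Claim_ definition above) =====
theorem find_all_indices_for_duplicates_spec : Claim_equal_find_all_indices_for_duplicates := by
  intro l _
  unfold Spec_find_all_indices_for_duplicates find_all_indices_for_duplicates find_all_indices_for_duplicates_alt
  have h := main_lemma l l [] PySem.Dict.empty PySem.Dict.empty [] (by simp)
    (by intro o; simp) (by intro o; simp) (by intro o h; simp at h)
  simp only [List.length_nil, Int.natCast_zero] at h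
  rw [h]
  simp only [pvPositions_getD]
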